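-- pv_equiv track=rewrite | github.com/francoo27/Simulacion | Ruleta.py | getFrecuenciaRelativa
-- ===== SOURCE A (Python) =====
-- class APUESTAS:
--     PAR = [2, 4, 6, 8, 10, 12, 14, 16, 18, 20, 22, 24, 26, 28, 30, 32, 34, 36]
--     IMPAR = [1, 3, 5, 7, 9, 11, 13, 15, 17, 19, 21, 23, 25, 27, 29, 31, 33, 35]
--     NEGRO = [2, 4, 6, 8, 10, 11, 13, 15, 17, 20, 22, 24, 26, 28, 29, 31, 33, 35]
--     ROJO = [1, 3, 5, 7, 9, 12, 14, 16, 18, 19, 21, 23, 25, 27, 30, 32, 34, 36]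
--     PRIMER_DOCE = [1, 2, 3, 4, 5, 6, 7, 8, 9, 10, 11, 12]
--     SEGUNDO_DOCE = [13, 14, 15, 16, 17, 18, 19, 20, 21, 22, 23, 24]
--     TERCER_DOCE = [25, 26, 27, 28, 29, 30, 31, 32, 33, 34, 35, 36]
--     PRIMER_COLUMNA = [1, 4, 7, 10, 13, 16, 19, 22, 25, 28, 31, 34]
--     SEGUNDA_COLUMNA = [2, 5, 8, 11, 14, 17, 20, 23, 26, 29, 32, 35]
--     TERCERA_COLUMNA = [3, 6, 9, 12, 15, 18, 21, 24, 27, 30, 33, 36]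
--     UNO_A_DIECIOCHO = [1, 2, 3, 4, 5, 6, 7, 8, 9, 10, 11, 12, 13, 14, 15, 16, 18]
--     DIECIOCHO_A_TREINTISEIS = [18, 19, 20, 21, 22, 23, 24, 25, 26, 27, 28, 29, 30, 31, 32, 33, 34, 35, 36]
--
-- def getFrecuenciaRelativa(tirada):
--     cont = [0, 0, 0]
--     c = 0
--     while c < len(tirada):
--         if(tirada[c] == 0):
--             cont[0] += 1
--         if(tirada[c] in APUESTAS.NEGRO):
--             cont[1] += 1
--         if(tirada[c] in APUESTAS.ROJO):
--             cont[2] += 1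
--         c += 1
--     return cont
-- ===== SOURCE B (Python) =====
-- def getFrecuenciaRelativa(tirada):
--     # Arithmetic colour rule instead of membership lists: for 1..36,
--     # a number is black iff its parity matches the "even-black" bands
--     # 1-10 and 19-28; red is the other colour in 1..36.
--     def es_negro(x):
--         return 1 <= x <= 36 and (x % 2 == 0) == (1 <= x <= 10 or 19 <= x <= 28)
--     zeros = sum(1 for x in tirada if x == 0)
--     black = sum(1 for x in tirada if es_negro(x))
--     red = sum(1 for x in tirada if 1 <= x <= 36 and not es_negro(x))
--     return [zeros, black, red]
-- ===== Notes on version B (the rewrite author's own statement) =====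
-- stated objective: alternative
-- what changed: B drops the colour lists entirely: it classifies each number by a closed arithmetic parity rule (black iff parity matches the even-black bands 1-10 and 19-28) and computes the three counts in three staged comprehension sums, removing A's two 18-element list scans per element.
import Mathlib
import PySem

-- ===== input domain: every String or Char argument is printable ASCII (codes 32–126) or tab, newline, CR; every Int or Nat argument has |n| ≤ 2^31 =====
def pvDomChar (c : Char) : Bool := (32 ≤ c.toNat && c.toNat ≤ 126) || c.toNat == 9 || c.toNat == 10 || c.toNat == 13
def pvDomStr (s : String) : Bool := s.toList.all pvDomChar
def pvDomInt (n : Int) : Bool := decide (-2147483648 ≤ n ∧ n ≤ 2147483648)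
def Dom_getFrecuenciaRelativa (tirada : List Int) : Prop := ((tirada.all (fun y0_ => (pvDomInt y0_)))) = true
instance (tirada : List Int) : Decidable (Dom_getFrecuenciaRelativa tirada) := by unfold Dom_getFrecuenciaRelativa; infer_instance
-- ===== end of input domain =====

-- B replaces A's per-element membership scans of the two colour lists by a closed arithmetic
-- parity rule (black iff parity matches the even-black bands 1-10 / 19-28) and three staged
-- counts (objective: alternative).


-- ===== PORT A =====
def NEGRO : List Int := [2, 4, 6, 8, 10, 11, 13, 15, 17, 20, 22, 24, 26, 28, 29, 31, 33, 35]
def ROJO : List Int := [1, 3, 5, 7, 9, 12, 14, 16, 18, 19, 21, 23, 25, 27, 30, 32, 34, 36]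

-- A's while-loop: index c over tirada, three independent `if`s updating cont in place.
def goA (tirada : List Int) (c : Nat) (cont : List Int) : List Int :=
  if h : c < tirada.length then
    let x := tirada[c]
    let cont1 := if x = 0 then cont.set 0 (cont.getD 0 0 + 1) else cont
    let cont2 := if x ∈ NEGRO then cont1.set 1 (cont1.getD 1 0 + 1) else cont1
    let cont3 := if x ∈ ROJO then cont2.set 2 (cont2.getD 2 0 + 1) else cont2
    goA tirada (c + 1) cont3
  else cont
termination_by tirada.length - c

def getFrecuenciaRelativa (tirada : List Int) : List Int :=
  goA tirada 0 [0, 0, 0]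

-- ===== PORT B =====
-- Source B's arithmetic colour rule: black iff 1 ≤ x ≤ 36 and parity matches the even-black bands.
-- (x % 2 is PySem.Int.mod, Python's floor mod with a positive divisor)
def esNegro (x : Int) : Bool :=
  (1 ≤ x && x ≤ 36) &&
    ((PySem.Int.mod x 2 == 0) == ((1 ≤ x && x ≤ 10) || (19 ≤ x && x ≤ 28)))

-- the three staged sums `sum(1 for x in tirada if p(x))`, ported as countP
def getFrecuenciaRelativa_alt (tirada : List Int) : List Int :=
  [ ((tirada.countP (fun x => x == 0) : Nat) : Int),
    ((tirada.countP (fun x => esNegro x) : Nat) : Int),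
    ((tirada.countP (fun x => (1 ≤ x && x ≤ 36) && !esNegro x) : Nat) : Int) ]

-- ===== PRECONDITION & SPEC =====
def Spec_getFrecuenciaRelativa (tirada : List Int) (out : List Int) : Prop := out = getFrecuenciaRelativa_alt tirada
instance (tirada : List Int) (out : List Int) : Decidable (Spec_getFrecuenciaRelativa tirada out) := by unfold Spec_getFrecuenciaRelativa; infer_instance

-- ===== CLAIM (what is proved, stated in full; the proofs are below) =====
def Claim_equal_getFrecuenciaRelativa : Prop := ∀ (tirada : List Int), Dom_getFrecuenciaRelativa tirada → Spec_getFrecuenciaRelativa tirada (getFrecuenciaRelativa tirada)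

-- ===== LEMMAS AND PROOFS =====

-- the three per-element indicator counts, phrased on A's membership predicates
def cntZ (xs : List Int) : Int := ((xs.countP (· = 0) : Nat) : Int)
def cntN (xs : List Int) : Int := ((xs.countP (· ∈ NEGRO) : Nat) : Int)
def cntR (xs : List Int) : Int := ((xs.countP (· ∈ ROJO) : Nat) : Int)

theorem cntZ_cons (x : Int) (xs : List Int) :
    cntZ (x :: xs) = (if x = 0 then 1 else 0) + cntZ xs := by
  simp [cntZ, List.countP_cons]; split_ifs <;> omega

theorem cntN_cons (x : Int) (xs : List Int) :
    cntN (x :: xs) = (if x ∈ NEGRO then 1 else 0) + cntN xs := by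
  simp [cntN, List.countP_cons]; split_ifs <;> omega

theorem cntR_cons (x : Int) (xs : List Int) :
    cntR (x :: xs) = (if x ∈ ROJO then 1 else 0) + cntR xs := by
  simp [cntR, List.countP_cons]; split_ifs <;> omega

-- B's parity rule computes exactly membership in NEGRO
set_option maxRecDepth 16384 in
theorem esNegro_eq_memNEGRO (x : Int) : esNegro x = decide (x ∈ NEGRO) := by
  by_cases h : 1 ≤ x ∧ x ≤ 36
  · obtain ⟨h1, h2⟩ := h; interval_cases x <;> decide
  · have hm : ¬ x ∈ NEGRO := by simp [NEGRO]; omega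
    have hg : (1 ≤ x && x ≤ 36) = false := by
      simp only [Bool.and_eq_false_iff, decide_eq_false_iff_not]; omega
    simp [esNegro, hg, hm]

-- B's red predicate computes exactly membership in ROJO
set_option maxRecDepth 16384 in
theorem red_eq_memROJO (x : Int) :
    ((1 ≤ x && x ≤ 36) && !esNegro x) = decide (x ∈ ROJO) := by
  by_cases h : 1 ≤ x ∧ x ≤ 36
  · obtain ⟨h1, h2⟩ := h; interval_cases x <;> decide
  · have hm : ¬ x ∈ ROJO := by simp [ROJO]; omega
    have hg : (1 ≤ x && x ≤ 36) = false := by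
      simp only [Bool.and_eq_false_iff, decide_eq_false_iff_not]; omega
    simp [hg, hm]

theorem alt_eq_cnt (tirada : List Int) :
    getFrecuenciaRelativa_alt tirada = [cntZ tirada, cntN tirada, cntR tirada] := by
  unfold getFrecuenciaRelativa_alt cntZ cntN cntR
  have hz : (fun x : Int => x == 0) = (fun x : Int => decide (x = 0)) := by
    funext x; rfl
  have hn : (fun x : Int => esNegro x) = (fun x : Int => decide (x ∈ NEGRO)) := by
    funext x; rw [esNegro_eq_memNEGRO]
  have hr : (fun x : Int => (1 ≤ x && x ≤ 36) && !esNegro x)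
      = (fun x : Int => decide (x ∈ ROJO)) := by
    funext x; rw [red_eq_memROJO]
  rw [hz, hn, hr]

-- closed form of A's while-loop
theorem goA_closed (tirada : List Int) : ∀ (n c : Nat), tirada.length - c = n → ∀ (a b d : Int),
    goA tirada c [a, b, d] =
      [a + cntZ (tirada.drop c), b + cntN (tirada.drop c), d + cntR (tirada.drop c)] := by
  intro n
  induction n with
  | zero =>
    intro c hc a b d
    have hlen : tirada.length ≤ c := by omega
    rw [goA]
    simp [Nat.not_lt.mpr hlen, List.drop_of_length_le hlen, cntZ, cntN, cntR]
  | succ n ih =>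
    intro c hc a b d
    have h : c < tirada.length := by omega
    have hdrop : tirada.drop c = tirada[c] :: tirada.drop (c + 1) :=
      List.drop_eq_getElem_cons h
    rw [goA]
    simp only [dif_pos h]
    have hrec := ih (c + 1) (by omega)
    rw [hdrop, cntZ_cons, cntN_cons, cntR_cons]
    by_cases h0 : tirada[c] = 0
    · simp [h0, hrec, (by decide : (((0:Int) ∈ NEGRO) = False)),
        (by decide : (((0:Int) ∈ ROJO) = False))]
      try ring_nf
    · by_cases hN : tirada[c] ∈ NEGRO
      · have hR : ¬ tirada[c] ∈ ROJO := by simp [NEGRO, ROJO] at hN ⊢; omega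
        simp [h0, hN, hR, hrec]
        try ring_nf
      · by_cases hR : tirada[c] ∈ ROJO
        · simp [h0, hN, hR, hrec]
          try ring_nf
        · simp [h0, hN, hR, hrec]
          try ring_nf

-- ===== VERDICT (by name: the statement is the Claim_ definition above) =====
theorem getFrecuenciaRelativa_spec : Claim_equal_getFrecuenciaRelativa := by
  intro tirada _
  unfold Spec_getFrecuenciaRelativa getFrecuenciaRelativa
  rw [goA_closed tirada tirada.length 0 (by omega) 0 0 0, alt_eq_cnt]
  simp
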